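-- pv_equiv track=rewrite | github.com/hadijamshidi/piProject | calculator/solver.py | make_persian
-- ===== SOURCE A (Python) =====
-- def make_persian(data_str, active=False):
--     if not active:
--         return data_str
--     eng2per = {
--         '0': '۰',
--         '1': '۱',
--         '2': '۲',
--         '3': '۳',
--         '4': '۴',
--         '5': '۵',
--         '6': '۶',
--         '7': '۷',
--         '8': '۸',
--         '9': '۹',
--     }
--     for eng_num, per_num in eng2per.items():
--         data_str = data_str.replace(eng_num, per_num)
--     return data_str
-- ===== SOURCE B (Python) =====
-- def make_persian(data_str, active=False):
--     if not active:
--         return data_str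
--     # Persian digits U+06F0..U+06F9 are the ASCII digits shifted by a fixed offset.
--     return ''.join(chr(ord(c) + 1728) if '0' <= c <= '9' else c for c in data_str)
-- ===== Notes on version B (the rewrite author's own statement) =====
-- stated objective: simpler
-- what changed: B drops the digit dict and the ten .replace() passes entirely: one pass over the characters, shifting each ASCII digit by the constant code-point offset 1728 (U+06F0 - '0') and keeping every other character.
import Mathlib
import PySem

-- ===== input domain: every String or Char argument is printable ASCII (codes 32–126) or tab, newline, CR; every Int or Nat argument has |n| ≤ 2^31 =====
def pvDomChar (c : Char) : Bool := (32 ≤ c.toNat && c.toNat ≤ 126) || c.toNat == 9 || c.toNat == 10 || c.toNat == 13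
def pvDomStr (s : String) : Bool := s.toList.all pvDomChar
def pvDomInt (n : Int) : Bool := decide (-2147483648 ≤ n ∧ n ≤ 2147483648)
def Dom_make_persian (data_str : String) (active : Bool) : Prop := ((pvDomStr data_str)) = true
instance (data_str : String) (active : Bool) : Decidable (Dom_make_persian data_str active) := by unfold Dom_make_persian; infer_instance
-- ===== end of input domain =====

-- B drops the digit dict and the ten .replace() passes: one pass over the characters,
-- shifting each ASCII digit by the constant code-point offset 1728; objective: simpler.

-- ===== PORT A =====
-- A's dict literal eng2per (insertion order of the ten digit pairs)
def pvEng2perA : PySem.Dict String String := PySem.Dict.ofList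
  [("0","۰"),("1","۱"),("2","۲"),("3","۳"),("4","۴"),("5","۵"),("6","۶"),("7","۷"),("8","۸"),("9","۹")]

-- 'for eng_num, per_num in eng2per.items(): data_str = data_str.replace(eng_num, per_num)'
def make_persian (data_str : String) (active : Bool) : String :=
  if !active then data_str
  else pvEng2perA.items.foldl (fun s p => PySem.Str.replace s p.1 p.2) data_str

-- ===== PORT B =====
-- ''.join(chr(ord(c) + 1728) if '0' <= c <= '9' else c for c in data_str)
def make_persian_alt (data_str : String) (active : Bool) : String :=
  if !active then data_str
  else String.ofList (data_str.toList.map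
    (fun c => if '0' ≤ c ∧ c ≤ '9' then Char.ofNat (c.toNat + 1728) else c))

-- ===== PRECONDITION & SPEC =====
def Spec_make_persian (data_str : String) (active : Bool) (out : String) : Prop := out = make_persian_alt data_str active
instance (data_str : String) (active : Bool) (out : String) : Decidable (Spec_make_persian data_str active out) := by unfold Spec_make_persian; infer_instance

-- ===== CLAIM =====
def Claim_equal_make_persian : Prop := ∀ (data_str : String) (active : Bool), Dom_make_persian data_str active → Spec_make_persian data_str active (make_persian data_str active)

-- ===== LEMMAS AND PROOFS =====

-- single-character substitution, the effect of one .replace(eng, per) pass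
def pvSub (a b c : Char) : Char := if c = a then b else c

-- the per-character digit shift B implements
def pvMap (c : Char) : Char :=
  if '0' ≤ c ∧ c ≤ '9' then Char.ofNat (c.toNat + 1728) else c

lemma pv_replace_go_single (a b : Char) : ∀ (fuel : Nat) (l acc : List Char), l.length ≤ fuel →
    PySem.Chars.replace.go [a] [b] fuel l acc = acc.reverse ++ l.map (pvSub a b) := by
  intro fuel
  induction fuel with
  | zero => intro l acc h; simp at h; simp [h, PySem.Chars.replace.go]
  | succ n ih =>
    intro l acc h
    cases l with
    | nil => simp [PySem.Chars.replace.go]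
    | cons c t =>
      simp only [PySem.Chars.replace.go, List.isPrefixOf]
      by_cases hc : c = a
      · simp [pvSub, hc, ih t _ (by simpa using h)]
      · simp [pvSub, Ne.symm hc, hc, ih t _ (by simpa using h)]

lemma pv_replace_single (s : List Char) (a b : Char) :
    PySem.Chars.replace s [a] [b] = s.map (pvSub a b) := by
  simp [PySem.Chars.replace, pv_replace_go_single a b s.length s [] le_rfl]

set_option maxHeartbeats 1000000 in
lemma pv_itemsA : pvEng2perA.items =
    [("0","۰"),("1","۱"),("2","۲"),("3","۳"),("4","۴"),("5","۵"),("6","۶"),("7","۷"),("8","۸"),("9","۹")] := by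
  decide

-- the ten chained single-character substitutions act like the single arithmetic shift
lemma pv_chain_eq (c : Char) :
    pvSub '9' '۹' (pvSub '8' '۸' (pvSub '7' '۷' (pvSub '6' '۶' (pvSub '5' '۵'
      (pvSub '4' '۴' (pvSub '3' '۳' (pvSub '2' '۲' (pvSub '1' '۱' (pvSub '0' '۰' c))))))))) = pvMap c := by
  by_cases h0 : c = '0'; · subst h0; decide
  by_cases h1 : c = '1'; · subst h1; decide
  by_cases h2 : c = '2'; · subst h2; decide
  by_cases h3 : c = '3'; · subst h3; decide
  by_cases h4 : c = '4'; · subst h4; decide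
  by_cases h5 : c = '5'; · subst h5; decide
  by_cases h6 : c = '6'; · subst h6; decide
  by_cases h7 : c = '7'; · subst h7; decide
  by_cases h8 : c = '8'; · subst h8; decide
  by_cases h9 : c = '9'; · subst h9; decide
  have hnd : ¬('0' ≤ c ∧ c ≤ '9') := by
    rintro ⟨hl, hr⟩
    have hl' : (48 : Nat) ≤ c.toNat := hl
    have hr' : c.toNat ≤ 57 := hr
    have : c.toNat = 48 ∨ c.toNat = 49 ∨ c.toNat = 50 ∨ c.toNat = 51 ∨ c.toNat = 52 ∨
        c.toNat = 53 ∨ c.toNat = 54 ∨ c.toNat = 55 ∨ c.toNat = 56 ∨ c.toNat = 57 := by omega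
    rcases this with h|h|h|h|h|h|h|h|h|h <;>
      first
        | exact h0 (Char.ext (UInt32.toNat_inj.mp h))
        | exact h1 (Char.ext (UInt32.toNat_inj.mp h))
        | exact h2 (Char.ext (UInt32.toNat_inj.mp h))
        | exact h3 (Char.ext (UInt32.toNat_inj.mp h))
        | exact h4 (Char.ext (UInt32.toNat_inj.mp h))
        | exact h5 (Char.ext (UInt32.toNat_inj.mp h))
        | exact h6 (Char.ext (UInt32.toNat_inj.mp h))
        | exact h7 (Char.ext (UInt32.toNat_inj.mp h))
        | exact h8 (Char.ext (UInt32.toNat_inj.mp h))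
        | exact h9 (Char.ext (UInt32.toNat_inj.mp h))
  simp [pvSub, pvMap, h0, h1, h2, h3, h4, h5, h6, h7, h8, h9, hnd]

set_option maxHeartbeats 1000000 in
lemma pv_A_toList (ds : String) :
    (make_persian ds true).toList = ds.toList.map pvMap := by
  simp only [make_persian, Bool.not_true, Bool.false_eq_true, if_false, pv_itemsA, List.foldl]
  simp only [PySem.Str.toList_replace,
    show ("0":String).toList = ['0'] from by decide, show ("۰":String).toList = ['۰'] from by decide,
    show ("1":String).toList = ['1'] from by decide, show ("۱":String).toList = ['۱'] from by decide,
    show ("2":String).toList = ['2'] from by decide, show ("۲":String).toList = ['۲'] from by decide,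
    show ("3":String).toList = ['3'] from by decide, show ("۳":String).toList = ['۳'] from by decide,
    show ("4":String).toList = ['4'] from by decide, show ("۴":String).toList = ['۴'] from by decide,
    show ("5":String).toList = ['5'] from by decide, show ("۵":String).toList = ['۵'] from by decide,
    show ("6":String).toList = ['6'] from by decide, show ("۶":String).toList = ['۶'] from by decide,
    show ("7":String).toList = ['7'] from by decide, show ("۷":String).toList = ['۷'] from by decide,
    show ("8":String).toList = ['8'] from by decide, show ("۸":String).toList = ['۸'] from by decide,
    show ("9":String).toList = ['9'] from by decide, show ("۹":String).toList = ['۹'] from by decide,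
    pv_replace_single, List.map_map]
  apply List.map_congr_left
  intro c _
  simp only [Function.comp]
  exact pv_chain_eq c

lemma pv_B_toList (ds : String) :
    (make_persian_alt ds true).toList = ds.toList.map pvMap := by
  simp only [make_persian_alt, Bool.not_true, Bool.false_eq_true, if_false,
    String.toList_ofList]
  rfl

lemma pv_toList_inj (s t : String) (h : s.toList = t.toList) : s = t := by
  have := congrArg String.ofList h
  simpa using this

-- ===== VERDICT =====
theorem make_persian_spec : Claim_equal_make_persian := by
  intro ds active _
  unfold Spec_make_persian
  cases active with
  | false => simp [make_persian, make_persian_alt]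
  | true => exact pv_toList_inj _ _ ((pv_A_toList ds).trans (pv_B_toList ds).symm)
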